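-- pv_equiv track=rewrite | github.com/ahmedkltn/matching_dashboard | app_dash.py | build_comp_key_mapping
-- ===== SOURCE A (Python) =====
-- def build_comp_key_mapping(offline_keys: list[str], looker_keys: list[str]) -> dict[str, str]:
--     mapping: dict[str, str] = {}
--     offline_set = list(dict.fromkeys(offline_keys))  # unique, preserve order
--
--     for lk in looker_keys:
--         candidates = []
--         for ok in offline_set:
--             shorter, longer = (ok, lk) if len(ok) <= len(lk) else (lk, ok)
--             if len(shorter) >= 4 and longer.startswith(shorter):
--                 candidates.append(ok)
--         mapping[lk] = candidates[0] if len(candidates) == 1 else lk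
--
--     return mapping
-- ===== SOURCE B (Python) =====
-- def build_comp_key_mapping(offline_keys: list[str], looker_keys: list[str]) -> dict[str, str]:
--     # Index the distinct offline keys by prefix once, so each looker key is
--     # resolved with len(lk) set lookups plus one dict lookup (no scan of offline_keys).
--     uniq = list(dict.fromkeys(offline_keys))
--     exact = set(uniq)
--     ext: dict[str, list[str]] = {}  # proper prefix -> offline keys extending it
--     for ok in uniq:
--         for i in range(len(ok)):
--             p = ok[:i]
--             if p in ext:
--                 ext[p].append(ok)
--             else:
--                 ext[p] = [ok]
--     mapping: dict[str, str] = {}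
--     for lk in looker_keys:
--         shorter = [lk[:i] for i in range(4, len(lk) + 1) if lk[:i] in exact]
--         longer = ext.get(lk, []) if len(lk) >= 4 else []
--         cands = shorter + longer
--         mapping[lk] = cands[0] if len(cands) == 1 else lk
--     return mapping
-- ===== Notes on version B (the rewrite author's own statement) =====
-- stated objective: faster
-- what changed: Instead of scanning every (deduplicated) offline key for each looker key, B builds a prefix index of the offline keys once (a set of the keys plus a dict from each proper prefix to the keys extending it) and resolves each looker key with len(lk) set probes and one dict lookup.
import Mathlib
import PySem

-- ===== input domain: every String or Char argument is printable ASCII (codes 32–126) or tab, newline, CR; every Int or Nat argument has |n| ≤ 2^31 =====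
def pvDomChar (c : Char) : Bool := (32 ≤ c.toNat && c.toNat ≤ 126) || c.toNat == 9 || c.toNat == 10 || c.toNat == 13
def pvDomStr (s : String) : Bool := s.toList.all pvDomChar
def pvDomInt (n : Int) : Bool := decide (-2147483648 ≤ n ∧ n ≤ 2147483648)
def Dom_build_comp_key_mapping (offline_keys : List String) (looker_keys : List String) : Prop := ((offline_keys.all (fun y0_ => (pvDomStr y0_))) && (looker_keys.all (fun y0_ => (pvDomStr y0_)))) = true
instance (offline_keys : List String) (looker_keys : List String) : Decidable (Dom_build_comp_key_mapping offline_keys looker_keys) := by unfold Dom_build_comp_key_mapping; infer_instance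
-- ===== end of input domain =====

-- B replaces A's scan of all offline keys per looker key by a prefix index of the
-- distinct offline keys built once; per looker key only prefix probes into a set and
-- one dict lookup remain (objective: faster).

-- ===== PORT A =====
-- the inner-loop candidate test of A, as written: shorter/longer by length, min length >= 4, prefix
def pvCondA (lk ok : String) : Bool :=
  let sl := if PySem.Str.len ok ≤ PySem.Str.len lk then (ok, lk) else (lk, ok)
  decide (4 ≤ PySem.Str.len sl.1) && PySem.Str.startswith sl.2 sl.1

def build_comp_key_mapping (offline_keys : List String) (looker_keys : List String) : List (String × String) :=
  let offline_set := PySem.List.dedup offline_keys   -- list(dict.fromkeys(offline_keys))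
  let mapping : PySem.Dict String String := looker_keys.foldl (fun mapping lk =>
    let candidates : List String := offline_set.foldl (fun candidates ok =>
      if pvCondA lk ok then candidates ++ [ok] else candidates) []
    mapping.insert lk (if candidates.length == 1
                       then (PySem.List.pyGet? candidates 0).getD lk else lk))
    PySem.Dict.empty
  mapping.items

-- ===== PORT B =====
-- s[:i]
def pvPfx (s : String) (i : Int) : String := PySem.Str.slice s none (some i)

def build_comp_key_mapping_alt (offline_keys : List String) (looker_keys : List String) : List (String × String) :=
  let uniq := PySem.List.dedup offline_keys
  let exact : PySem.Set String := PySem.Set.ofList uniq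
  let ext : PySem.Dict String (List String) := uniq.foldl (fun ext ok =>
      (PySem.List.pyRange 0 (PySem.Str.len ok)).foldl (fun ext i =>
        let p := pvPfx ok i
        if ext.contains p then ext.modify p [] (fun l => l ++ [ok]) else ext.insert p [ok]) ext)
    PySem.Dict.empty
  let mapping : PySem.Dict String String := looker_keys.foldl (fun mapping lk =>
    let shorter := ((PySem.List.pyRange 4 (PySem.Str.len lk + 1)).filter
        (fun i => PySem.Set.contains exact (pvPfx lk i))).map (fun i => pvPfx lk i)
    let longer := if 4 ≤ PySem.Str.len lk then ext.getD lk [] else []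
    let cands := shorter ++ longer
    mapping.insert lk (if cands.length == 1
                       then (PySem.List.pyGet? cands 0).getD lk else lk))
    PySem.Dict.empty
  mapping.items

-- ===== PRECONDITION & SPEC =====
def Spec_build_comp_key_mapping (offline_keys : List String) (looker_keys : List String) (out : List (String × String)) : Prop := out = build_comp_key_mapping_alt offline_keys looker_keys
instance (offline_keys : List String) (looker_keys : List String) (out : List (String × String)) : Decidable (Spec_build_comp_key_mapping offline_keys looker_keys out) := by unfold Spec_build_comp_key_mapping; infer_instance

-- ===== CLAIM (what is proved, stated in full; the proofs are below) =====
def Claim_equal_build_comp_key_mapping : Prop := ∀ (offline_keys : List String) (looker_keys : List String), Dom_build_comp_key_mapping offline_keys looker_keys → Spec_build_comp_key_mapping offline_keys looker_keys (build_comp_key_mapping offline_keys looker_keys)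

-- ===== LEMMAS AND PROOFS =====

-- the two disjoint halves of A's candidate test
def pvP1 (lk ok : String) : Bool :=
  decide (4 ≤ ok.toList.length ∧ ok.toList.length ≤ lk.toList.length ∧ ok.toList <+: lk.toList)
def pvP2 (lk ok : String) : Bool :=
  decide (4 ≤ lk.toList.length ∧ lk.toList.length < ok.toList.length ∧ lk.toList <+: ok.toList)
-- "q is a proper prefix of ok"
def pvPP (q ok : String) : Bool :=
  decide (q.toList <+: ok.toList ∧ q.toList.length < ok.toList.length)

theorem pvPfx_toList (s : String) (i : Int) (h : 0 ≤ i) :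
    (pvPfx s i).toList = s.toList.take i.toNat := by
  simp [pvPfx, PySem.Str.toList_slice, PySem.Chars.slice_eq_listSlice, PySem.List.slice_to _ h]

theorem pvCondA_eq (lk ok : String) : pvCondA lk ok = (pvP1 lk ok || pvP2 lk ok) := by
  simp only [pvCondA, pvP1, pvP2, PySem.Str.len_eq, PySem.Str.startswith_eq]
  by_cases h : ok.toList.length ≤ lk.toList.length
  · have h' : ((ok.toList.length : Int) ≤ (lk.toList.length : Int)) := by exact_mod_cast h
    simp only [if_pos h']; rw [Bool.eq_iff_iff]
    simp only [Bool.and_eq_true, Bool.or_eq_true, decide_eq_true_eq, PySem.Chars.startswith_iff]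
    constructor
    · rintro ⟨h4, hp⟩; exact Or.inl ⟨by exact_mod_cast h4, h, hp⟩
    · rintro (⟨h4, _, hp⟩ | ⟨_, hlt, _⟩)
      · exact ⟨by exact_mod_cast h4, hp⟩
      · omega
  · have h' : ¬((ok.toList.length : Int) ≤ (lk.toList.length : Int)) := by exact_mod_cast h
    simp only [if_neg h']; rw [Bool.eq_iff_iff]
    simp only [Bool.and_eq_true, Bool.or_eq_true, decide_eq_true_eq, PySem.Chars.startswith_iff]
    constructor
    · rintro ⟨h4, hp⟩; exact Or.inr ⟨by exact_mod_cast h4, by omega, hp⟩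
    · rintro (⟨_, hle, _⟩ | ⟨h4, _, hp⟩)
      · omega
      · exact ⟨by exact_mod_cast h4, hp⟩

theorem pvFilter_or_perm {α : Type} (p q : α → Bool) (l : List α)
    (hdisj : ∀ x, ¬(p x = true ∧ q x = true)) :
    (l.filter (fun x => p x || q x)).Perm (l.filter p ++ l.filter q) := by
  induction l with
  | nil => simp
  | cons x xs ih =>
    by_cases hp : p x
    · have hq : q x = false := by have := hdisj x; simp [hp] at this; simp [this]
      simpa [hp, hq] using ih.cons x
    · by_cases hq : q x
      · simp only [List.filter_cons, hp, hq, Bool.or_true]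
        simpa using (ih.cons x).trans (List.perm_middle).symm
      · simp only [List.filter_cons, hp, hq]
        simpa [hp, hq] using ih

-- the effect of one iteration of B's index-building inner loop on a lookup
theorem pvStep_getD (e : PySem.Dict String (List String)) (p q : String) (ok : String) :
    (if e.contains p then e.modify p [] (fun l => l ++ [ok]) else e.insert p [ok]).getD q []
      = if q = p then e.getD p [] ++ [ok] else e.getD q [] := by
  by_cases hc : e.contains p
  · simp [hc, PySem.Dict.getD_modify]
  · simp only [hc, Bool.false_eq_true, if_false, PySem.Dict.getD_insert]
    split
    · next h => subst h; simp [PySem.Dict.getD_of_not_contains e [] (by simpa using hc)]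
    · rfl

theorem pvPfx_iff (ok q : String) (a : Nat) (ha : a ≤ ok.toList.length) :
    q = pvPfx ok (a : Int) ↔ (q.toList <+: ok.toList ∧ q.toList.length = a) := by
  constructor
  · rintro rfl
    rw [pvPfx_toList _ _ (by positivity)]
    refine ⟨List.take_prefix _ _, ?_⟩
    simp only [List.length_take]
    omega
  · rintro ⟨hp, hl⟩
    rw [← String.toList_inj, pvPfx_toList _ _ (by positivity)]
    rw [List.prefix_iff_eq_take] at hp
    simpa [hl] using hp

-- the inner loop over the proper prefixes of ok, from position a on
theorem pvInner_getD (ok q : String) :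
    ∀ (k : Nat) (a : Nat) (e : PySem.Dict String (List String)), a + k = ok.toList.length →
    ((PySem.List.pyRange (a : Int) (PySem.Str.len ok)).foldl (fun ext i =>
        let p := pvPfx ok i
        if ext.contains p then ext.modify p [] (fun l => l ++ [ok]) else ext.insert p [ok]) e).getD q []
      = e.getD q [] ++ (if (q.toList <+: ok.toList ∧ a ≤ q.toList.length) ∧ q.toList.length < ok.toList.length
                        then [ok] else []) := by
  intro k
  induction k with
  | zero =>
    intro a e h
    rw [PySem.List.pyRange_one_eq_nil (by rw [PySem.Str.len_eq]; omega)]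
    simp only [List.foldl_nil]
    rw [if_neg (by omega)]
    simp
  | succ k ih =>
    intro a e h
    rw [PySem.List.pyRange_one_cons (by rw [PySem.Str.len_eq]; omega)]
    simp only [List.foldl_cons]
    have hcast : ((a : Int) + 1) = ((a + 1 : Nat) : Int) := by push_cast; ring
    rw [hcast, ih (a + 1) _ (by omega)]
    rw [pvStep_getD]
    by_cases hq : q = pvPfx ok (a : Int)
    · have hql : q.toList.length = a ∧ q.toList <+: ok.toList := by
        have := (pvPfx_iff ok q a (by omega)).mp hq
        exact ⟨this.2, this.1⟩
      rw [if_pos hq, if_neg (by omega), if_pos (by exact ⟨⟨hql.2, by omega⟩, by omega⟩)]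
      rw [hq]; simp
    · rw [if_neg hq]
      congr 1
      by_cases hcond : (q.toList <+: ok.toList ∧ a + 1 ≤ q.toList.length) ∧ q.toList.length < ok.toList.length
      · rw [if_pos hcond, if_pos ⟨⟨hcond.1.1, by omega⟩, hcond.2⟩]
      · rw [if_neg hcond]
        rw [if_neg ?_]
        rintro ⟨⟨hp, hge⟩, hlt⟩
        have : q.toList.length = a := by
          by_contra hne
          exact hcond ⟨⟨hp, by omega⟩, hlt⟩
        exact hq ((pvPfx_iff ok q a (by omega)).mpr ⟨hp, this⟩)

-- the whole index: looking up q yields exactly the keys of us having q as a proper prefix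
theorem pvExt_getD (q : String) :
    ∀ (us : List String) (e : PySem.Dict String (List String)),
    ((us.foldl (fun ext ok =>
      (PySem.List.pyRange 0 (PySem.Str.len ok)).foldl (fun ext i =>
        let p := pvPfx ok i
        if ext.contains p then ext.modify p [] (fun l => l ++ [ok]) else ext.insert p [ok]) ext) e)).getD q []
      = e.getD q [] ++ us.filter (pvPP q) := by
  intro us
  induction us with
  | nil => intro e; simp
  | cons ok us ih =>
    intro e
    simp only [List.foldl_cons]
    rw [ih]
    have h0 : ((0 : Int)) = ((0 : Nat) : Int) := rfl
    rw [h0, pvInner_getD ok q ok.toList.length 0 e (by omega)]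
    by_cases hc : q.toList <+: ok.toList ∧ q.toList.length < ok.toList.length
    · rw [if_pos ⟨⟨hc.1, by omega⟩, hc.2⟩]
      rw [List.filter_cons, if_pos (show pvPP q ok = true from decide_eq_true hc)]
      simp
    · rw [if_neg (by rintro ⟨⟨h1, _⟩, h2⟩; exact hc ⟨h1, h2⟩)]
      simp only [List.filter_cons, List.append_nil]
      rw [if_neg (by rw [show pvPP q ok = false from decide_eq_false hc]; simp)]

-- B's prefix probe is a permutation of A's short-candidate sublist
theorem pvShorter_perm (lk : String) (U : List String) (hU : U.Nodup) :
    (((PySem.List.pyRange 4 (PySem.Str.len lk + 1)).filter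
        (fun i => PySem.Set.contains (PySem.Set.ofList U) (pvPfx lk i))).map (fun i => pvPfx lk i)).Perm
      (U.filter (pvP1 lk)) := by
  apply List.perm_of_nodup_nodup_toFinset_eq
  · apply List.Nodup.map_on
    · intro i hi j hj hij
      have hi' := PySem.List.mem_pyRange_one.mp (List.mem_of_mem_filter hi)
      have hj' := PySem.List.mem_pyRange_one.mp (List.mem_of_mem_filter hj)
      rw [PySem.Str.len_eq] at hi' hj'
      have hlen : (pvPfx lk i).toList.length = (pvPfx lk j).toList.length := by rw [hij]
      rw [pvPfx_toList _ _ (by omega), pvPfx_toList _ _ (by omega)] at hlen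
      simp only [List.length_take] at hlen
      omega
    · exact ((PySem.List.nodup_pyRange_one _ _).filter _)
  · exact hU.filter _
  · ext x
    simp only [List.mem_toFinset, List.mem_map, List.mem_filter, PySem.List.mem_pyRange_one,
      PySem.Set.contains_iff, PySem.Set.mem_ofList, pvP1, decide_eq_true_eq, PySem.Str.len_eq]
    constructor
    · rintro ⟨i, ⟨⟨h4, hlt⟩, hmem⟩, rfl⟩
      refine ⟨hmem, ?_⟩
      have h0 : (0 : Int) ≤ i := by omega
      have htl := pvPfx_toList lk i h0
      rw [htl]
      have hlen : (lk.toList.take i.toNat).length = i.toNat := by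
        simp only [List.length_take]; omega
      exact ⟨by rw [hlen]; omega, by rw [hlen]; omega, List.take_prefix _ _⟩
    · rintro ⟨hmem, h4, hle, hp⟩
      have hx : pvPfx lk (x.toList.length : Int) = x := by
        rw [← String.toList_inj, pvPfx_toList _ _ (by positivity)]
        rw [List.prefix_iff_eq_take] at hp
        simpa using hp.symm
      exact ⟨(x.toList.length : Int), ⟨⟨by omega, by omega⟩, by rwa [hx]⟩, hx⟩

-- a perm-invariant selection: the value both programs derive from their candidate lists
theorem pvSel_eq (lk : String) (l l' : List String) (h : l.Perm l') :
    (if l'.length == 1 then (PySem.List.pyGet? l' 0).getD lk else lk)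
    = (if l.length == 1 then (PySem.List.pyGet? l 0).getD lk else lk) := by
  by_cases h1 : l.length = 1
  · obtain ⟨x, hx⟩ := List.length_eq_one_iff.mp h1
    have hl' : l' = [x] := List.perm_singleton.mp (hx ▸ h).symm
    rw [hx, hl']
  · have h2 : l'.length ≠ 1 := by rw [← h.length_eq]; exact h1
    rw [if_neg (by simp [h2]), if_neg (by simp [h1])]

-- per looker key the two computed values agree
theorem pvVal_eq (lk : String) (U : List String) (hU : U.Nodup) :
    (let candidates : List String := U.foldl (fun candidates ok =>
        if pvCondA lk ok then candidates ++ [ok] else candidates) []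
     if candidates.length == 1 then (PySem.List.pyGet? candidates 0).getD lk else lk)
    = (let shorter := ((PySem.List.pyRange 4 (PySem.Str.len lk + 1)).filter
          (fun i => PySem.Set.contains (PySem.Set.ofList U) (pvPfx lk i))).map (fun i => pvPfx lk i)
       let longer := if 4 ≤ PySem.Str.len lk
                     then (U.foldl (fun ext ok =>
                        (PySem.List.pyRange 0 (PySem.Str.len ok)).foldl (fun ext i =>
                          let p := pvPfx ok i
                          if ext.contains p then ext.modify p [] (fun l => l ++ [ok]) else ext.insert p [ok]) ext)
                        PySem.Dict.empty).getD lk []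
                     else []
       let cands := shorter ++ longer
       if cands.length == 1 then (PySem.List.pyGet? cands 0).getD lk else lk) := by
  have hcand : (U.foldl (fun candidates ok =>
      if pvCondA lk ok then candidates ++ [ok] else candidates) [])
      = U.filter (fun ok => pvCondA lk ok) := by
    simpa using PySem.List.foldl_append_if (fun ok => pvCondA lk ok) id U []
  have hsplit : (U.filter (fun ok => pvCondA lk ok)).Perm
      (U.filter (pvP1 lk) ++ U.filter (pvP2 lk)) := by
    rw [List.filter_congr (fun x _ => pvCondA_eq lk x)]
    refine pvFilter_or_perm _ _ _ (fun x => ?_)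
    simp only [pvP1, pvP2, decide_eq_true_eq]
    rintro ⟨⟨_, hle, _⟩, ⟨_, hlt, _⟩⟩
    omega
  have hlonger : (if 4 ≤ PySem.Str.len lk
      then (U.foldl (fun ext ok =>
          (PySem.List.pyRange 0 (PySem.Str.len ok)).foldl (fun ext i =>
            let p := pvPfx ok i
            if ext.contains p then ext.modify p [] (fun l => l ++ [ok]) else ext.insert p [ok]) ext)
          PySem.Dict.empty).getD lk []
      else []) = U.filter (pvP2 lk) := by
    by_cases h4 : 4 ≤ PySem.Str.len lk
    · rw [if_pos h4, pvExt_getD lk U PySem.Dict.empty, PySem.Dict.getD_empty, List.nil_append]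
      rw [PySem.Str.len_eq] at h4
      refine List.filter_congr (fun x _ => ?_)
      rw [Bool.eq_iff_iff]
      simp only [pvPP, pvP2, decide_eq_true_eq]
      constructor
      · rintro ⟨hp, hl⟩; exact ⟨by omega, hl, hp⟩
      · rintro ⟨_, hl, hp⟩; exact ⟨hp, hl⟩
    · rw [if_neg h4, eq_comm, List.filter_eq_nil_iff]
      rw [PySem.Str.len_eq] at h4
      intro x _
      simp only [pvP2, decide_eq_true_eq]
      rintro ⟨ha, _, _⟩
      omega
  simp only [hcand, hlonger]
  have hperm : ((((PySem.List.pyRange 4 (PySem.Str.len lk + 1)).filter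
        (fun i => PySem.Set.contains (PySem.Set.ofList U) (pvPfx lk i))).map (fun i => pvPfx lk i))
        ++ U.filter (pvP2 lk)).Perm (U.filter (fun ok => pvCondA lk ok)) :=
    ((pvShorter_perm lk U hU).append_right _).trans hsplit.symm
  exact pvSel_eq lk _ _ hperm

-- ===== VERDICT (by name: the statement is the Claim_ definition above) =====
theorem build_comp_key_mapping_spec : Claim_equal_build_comp_key_mapping := by
  intro offline_keys looker_keys _
  show build_comp_key_mapping offline_keys looker_keys
      = build_comp_key_mapping_alt offline_keys looker_keys
  simp only [build_comp_key_mapping, build_comp_key_mapping_alt]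
  refine congrArg PySem.Dict.items ?_
  refine List.foldl_ext _ _ _ (fun m lk _ => ?_)
  exact congrArg (m.insert lk) (pvVal_eq lk (PySem.List.dedup offline_keys) (PySem.List.nodup_dedup _))
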